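-- pv_equiv track=rewrite | github.com/leporis/Works | Lecture/AI_Digital_Literacy/Simulators/MachineLearning/SpuervisedLearning/01_Linear_Regression/범용 선형회귀 시뮬레이터/generate_pdfs.py | replace_codeblock
-- ===== SOURCE A (Python) =====
-- def replace_codeblock(lines, start_line, end_line, replacement_html):
--     """코드블록(start_line~end_line, 1-indexed)을 이미지로 대체"""
--     # 마크다운에서 ``` 블록을 특수 마커로 교체
--     marker = f'<!--IMG_PLACEHOLDER_{start_line}-->'
--     new_lines = []
--     skip = False
--     for i, line in enumerate(lines, 1):
--         if i == start_line:
--             new_lines.append(marker + '\n')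
--             skip = True
--             continue
--         if skip and i <= end_line:
--             continue
--         if i == end_line + 1:
--             skip = False
--         new_lines.append(line)
--     return new_lines, marker, replacement_html
-- ===== SOURCE B (Python) =====
-- def replace_codeblock(lines, start_line, end_line, replacement_html):
--     """코드블록(start_line~end_line, 1-indexed)을 이미지로 대체"""
--     marker = f'<!--IMG_PLACEHOLDER_{start_line}-->'
--     if 1 <= start_line <= len(lines):
--         new_lines = lines[:start_line - 1] + [marker + '\n'] + lines[max(start_line, end_line):]
--     else:
--         new_lines = list(lines)
--     return new_lines, marker, replacement_html
-- ===== Notes on version B (the rewrite author's own statement) =====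
-- stated objective: simpler
-- what changed: Replaced the index-counting loop with a skip flag by a direct slice computation: kept prefix lines[:start_line-1], the marker line, and suffix lines[max(start_line,end_line):] under a single range guard.
import Mathlib
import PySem

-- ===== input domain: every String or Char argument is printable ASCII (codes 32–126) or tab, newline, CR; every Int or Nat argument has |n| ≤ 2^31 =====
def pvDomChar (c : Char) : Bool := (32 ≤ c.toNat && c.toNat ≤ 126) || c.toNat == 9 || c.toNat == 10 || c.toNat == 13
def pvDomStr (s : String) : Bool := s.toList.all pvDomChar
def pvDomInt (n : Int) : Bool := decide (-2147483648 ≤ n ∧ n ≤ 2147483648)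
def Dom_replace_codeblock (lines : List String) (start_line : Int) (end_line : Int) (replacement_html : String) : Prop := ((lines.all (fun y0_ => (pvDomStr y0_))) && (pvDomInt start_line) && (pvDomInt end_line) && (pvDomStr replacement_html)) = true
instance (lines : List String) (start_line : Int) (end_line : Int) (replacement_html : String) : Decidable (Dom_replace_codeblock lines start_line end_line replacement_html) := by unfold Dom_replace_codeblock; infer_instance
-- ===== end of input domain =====

-- B replaces A's counting loop with a guarded prefix/marker/suffix slice computation (simpler, same cost).

-- ===== PORT A =====
-- the for-loop over enumerate(lines, 1) with accumulator new_lines and the skip flag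
def pvA_loop (start_line end_line : Int) (marker : String) :
    List String → Int → List String × Bool → List String × Bool
  | [], _, st => st
  | line :: rest, i, (acc, skip) =>
    if i = start_line then
      pvA_loop start_line end_line marker rest (i + 1) (acc ++ [marker ++ "\n"], true)
    else if skip = true ∧ i ≤ end_line then
      pvA_loop start_line end_line marker rest (i + 1) (acc, skip)
    else
      pvA_loop start_line end_line marker rest (i + 1)
        (acc ++ [line], if i = end_line + 1 then false else skip)

def replace_codeblock (lines : List String) (start_line : Int) (end_line : Int) (replacement_html : String) : List String × String × String :=
  let marker := "<!--IMG_PLACEHOLDER_" ++ PySem.Int.toStr start_line ++ "-->"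
  let new_lines := (pvA_loop start_line end_line marker lines 1 ([], false)).1
  (new_lines, marker, replacement_html)

-- ===== PORT B =====
def replace_codeblock_alt (lines : List String) (start_line : Int) (end_line : Int) (replacement_html : String) : List String × String × String :=
  let marker := "<!--IMG_PLACEHOLDER_" ++ PySem.Int.toStr start_line ++ "-->"
  let new_lines :=
    if 1 ≤ start_line ∧ start_line ≤ PySem.List.len lines then
      PySem.List.slice lines none (some (start_line - 1)) ++ [marker ++ "\n"]
        ++ PySem.List.slice lines (some (max start_line end_line)) none
    else lines
  (new_lines, marker, replacement_html)

-- ===== PRECONDITION & SPEC =====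
def Spec_replace_codeblock (lines : List String) (start_line : Int) (end_line : Int) (replacement_html : String) (out : List String × String × String) : Prop := out = replace_codeblock_alt lines start_line end_line replacement_html
instance (lines : List String) (start_line : Int) (end_line : Int) (replacement_html : String) (out : List String × String × String) : Decidable (Spec_replace_codeblock lines start_line end_line replacement_html out) := by unfold Spec_replace_codeblock; infer_instance

-- ===== CLAIM (what is proved, stated in full; the proofs are below) =====
def Claim_equal_replace_codeblock : Prop := ∀ (lines : List String) (start_line : Int) (end_line : Int) (replacement_html : String), Dom_replace_codeblock lines start_line end_line replacement_html → Spec_replace_codeblock lines start_line end_line replacement_html (replace_codeblock lines start_line end_line replacement_html)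

-- ===== LEMMAS AND PROOFS =====

-- Once past start_line with skip = false, the loop appends every remaining line.
theorem pvA_loop_false (start_line end_line : Int) (marker : String) :
    ∀ (ls : List String) (i : Int) (acc : List String), start_line < i →
      (pvA_loop start_line end_line marker ls i (acc, false)).1 = acc ++ ls := by
  intro ls
  induction ls with
  | nil => intro i acc _; simp [pvA_loop]
  | cons l rest ih =>
    intro i acc h
    simp only [pvA_loop]
    rw [if_neg (show ¬ i = start_line by omega),
        if_neg (show ¬ (false = true ∧ i ≤ end_line) by simp), ite_self,
        ih (i + 1) (acc ++ [l]) (by omega)]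
    simp

-- Once past start_line with skip = true, the loop drops lines up to end_line and keeps the rest.
theorem pvA_loop_true (start_line end_line : Int) (marker : String) :
    ∀ (ls : List String) (i : Int) (acc : List String), start_line < i →
      (pvA_loop start_line end_line marker ls i (acc, true)).1
        = acc ++ ls.drop (end_line + 1 - i).toNat := by
  intro ls
  induction ls with
  | nil => intro i acc _; simp [pvA_loop]
  | cons l rest ih =>
    intro i acc h
    simp only [pvA_loop]
    rw [if_neg (show ¬ i = start_line by omega)]
    by_cases hle : i ≤ end_line
    · rw [if_pos ⟨trivial, hle⟩, ih (i + 1) acc (by omega),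
          show (end_line + 1 - i).toNat = (end_line + 1 - (i + 1)).toNat + 1 by omega,
          List.drop_succ_cons]
    · rw [if_neg (show ¬ (True ∧ i ≤ end_line) by simp [hle])]
      have h0 : (end_line + 1 - i).toNat = 0 := by omega
      by_cases heq : i = end_line + 1
      · rw [if_pos heq, pvA_loop_false start_line end_line marker rest (i + 1) (acc ++ [l]) (by omega)]
        simp [h0]
      · rw [if_neg heq, ih (i + 1) (acc ++ [l]) (by omega)]
        simp [h0, show (end_line - i).toNat = 0 by omega]

-- Before start_line with skip = false: prefix kept; if start_line is reached, marker then suffix.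
theorem pvA_loop_pre (start_line end_line : Int) (marker : String) :
    ∀ (ls : List String) (i : Int) (acc : List String), i ≤ start_line →
      (pvA_loop start_line end_line marker ls i (acc, false)).1
        = acc ++ (if (start_line - i).toNat < ls.length then
            ls.take (start_line - i).toNat ++ (marker ++ "\n")
              :: ls.drop (max start_line end_line + 1 - i).toNat
          else ls) := by
  intro ls
  induction ls with
  | nil => intro i acc _; simp [pvA_loop]
  | cons l rest ih =>
    intro i acc h
    simp only [pvA_loop]
    by_cases heq : i = start_line
    · rw [if_pos heq,
          pvA_loop_true start_line end_line marker rest (i + 1) (acc ++ [marker ++ "\n"]) (by omega)]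
      have h1 : (start_line - i).toNat = 0 := by omega
      have h2 : (max start_line end_line + 1 - i).toNat = (end_line + 1 - (i + 1)).toNat + 1 := by
        omega
      rw [if_pos (show (start_line - i).toNat < (l :: rest).length by simp [h1]),
          h1, h2, List.drop_succ_cons]
      simp
    · rw [if_neg heq, if_neg (show ¬ (false = true ∧ i ≤ end_line) by simp), ite_self,
          ih (i + 1) (acc ++ [l]) (by omega)]
      have h1 : (start_line - i).toNat = (start_line - (i + 1)).toNat + 1 := by omega
      have h2 : (max start_line end_line + 1 - i).toNat
          = (max start_line end_line + 1 - (i + 1)).toNat + 1 := by omega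
      by_cases hc : (start_line - (i + 1)).toNat < rest.length
      · rw [if_pos hc,
            if_pos (show (start_line - i).toNat < (l :: rest).length by
              simp only [List.length_cons]; omega),
            h1, h2, List.take_succ_cons, List.drop_succ_cons]
        simp
      · rw [if_neg hc,
            if_neg (show ¬ (start_line - i).toNat < (l :: rest).length by
              simp only [List.length_cons]; omega)]
        simp

-- ===== VERDICT (by name: the statement is the Claim_ definition above) =====
theorem replace_codeblock_spec : Claim_equal_replace_codeblock := by
  unfold Claim_equal_replace_codeblock
  intro lines start_line end_line replacement_html _
  unfold Spec_replace_codeblock replace_codeblock replace_codeblock_alt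
  simp only [PySem.List.len_eq]
  by_cases hg : 1 ≤ start_line ∧ start_line ≤ (lines.length : Int)
  · obtain ⟨h1, h2⟩ := hg
    rw [if_pos ⟨h1, h2⟩, pvA_loop_pre start_line end_line _ lines 1 [] h1,
        if_pos (show (start_line - 1).toNat < lines.length by omega),
        PySem.List.slice_to lines (show (0:Int) ≤ start_line - 1 by omega),
        PySem.List.slice_from lines (show (0:Int) ≤ max start_line end_line by omega),
        show (max start_line end_line + 1 - 1).toNat = (max start_line end_line).toNat by omega]
    simp
  · rw [if_neg hg]
    rcases (by omega : start_line < 1 ∨ (lines.length : Int) < start_line) with hlt | hgt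
    · rw [pvA_loop_false start_line end_line _ lines 1 [] (by omega)]
      simp
    · rw [pvA_loop_pre start_line end_line _ lines 1 [] (by omega),
          if_neg (show ¬ (start_line - 1).toNat < lines.length by omega)]
      simp
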